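-- pv_equiv track=rewrite | github.com/Agony5757/QPanda-lite | qpandalite/circuit_builder/translate_qasm2_oir.py | decompose_mcx_qasm_text
-- ===== SOURCE A (Python) =====
-- from typing import List, Optional, Tuple, Union
--
-- def decompose_mcx_qasm_text(controls: List[int], target: int, qubit_num: int) -> str:
--     """Decompose an n-control X (MCX) gate into QASM 2.0 Toffoli-ladder statements.
--
--     Uses a clean-ancilla ladder (Barenco et al. 1995, adapted): n-2 workspace
--     qubits are borrowed from existing circuit qubits not involved in the gate.
--     The workspace qubits must be in state |0⟩ at the call site; they are
--     restored to |0⟩ after the decomposition.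
--
--     Args:
--         controls: Ordered list of n ≥ 4 control qubit indices.
--         target: Target qubit index.
--         qubit_num: Total number of qubits declared in the circuit (``qreg q[N]``).
--
--     Returns:
--         Multi-line QASM 2.0 string (Toffoli gates only; no semicolon-separated
--         single line — the returned string may contain ``\\n``).
--
--     Raises:
--         NotImplementedError: Not enough workspace qubits are available in the
--             circuit.  Use OriginIR export (which supports arbitrary-width
--             controlled gates natively) or add workspace qubits to the circuit.
--     """
--     n = len(controls)
--     assert n >= 4, f"decompose_mcx_qasm_text requires n>=4, got {n}"
--     n_workspace = n - 2
--
--     used = set(controls) | {target}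
--     workspace = [q for q in range(qubit_num) if q not in used][:n_workspace]
--
--     if len(workspace) < n_workspace:
--         raise NotImplementedError(
--             f"MCX with {n} controls needs {n_workspace} workspace qubits, "
--             f"but only {len(workspace)} are available in a {qubit_num}-qubit circuit. "
--             "Add workspace qubits to the circuit, or use OriginIR export which "
--             "supports arbitrary-width multi-controlled gates natively."
--         )
--
--     lines: List[str] = []
--     # Forward ladder: compute AND(c0, c1, …, c_{n-2}) into workspace[-1].
--     lines.append(f"ccx q[{controls[0]}], q[{controls[1]}], q[{workspace[0]}];")
--     for i in range(1, n_workspace):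
--         lines.append(f"ccx q[{controls[i + 1]}], q[{workspace[i - 1]}], q[{workspace[i]}];")
--     # Apply to target using the last control and the accumulated AND.
--     lines.append(f"ccx q[{controls[-1]}], q[{workspace[-1]}], q[{target}];")
--     # Uncompute workspace (reverse order).
--     for i in range(n_workspace - 1, 0, -1):
--         lines.append(f"ccx q[{controls[i + 1]}], q[{workspace[i - 1]}], q[{workspace[i]}];")
--     lines.append(f"ccx q[{controls[0]}], q[{controls[1]}], q[{workspace[0]}];")
--
--     return "\n".join(lines)
-- ===== SOURCE B (Python) =====
-- def decompose_mcx_qasm_text(controls, target, qubit_num):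
--     n = len(controls)
--     assert n >= 4, f"decompose_mcx_qasm_text requires n>=4, got {n}"
--     n_workspace = n - 2
--
--     used = set(controls) | {target}
--     workspace = [q for q in range(qubit_num) if q not in used][:n_workspace]
--
--     if len(workspace) < n_workspace:
--         raise NotImplementedError(
--             f"MCX with {n} controls needs {n_workspace} workspace qubits, "
--             f"but only {len(workspace)} are available in a {qubit_num}-qubit circuit. "
--             "Add workspace qubits to the circuit, or use OriginIR export which "
--             "supports arbitrary-width multi-controlled gates natively."
--         )
--
--     # The decomposition is V · X_target · V†, where V is the Toffoli ladder and
--     # V† mirrors V gate by gate.  Build it by a recursive conjugation sandwich: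
--     # each ladder gate wraps the rest of the construction on both sides.
--     triples = [(controls[0], controls[1], workspace[0])] + [
--         (controls[i + 1], workspace[i - 1], workspace[i])
--         for i in range(1, n_workspace)
--     ]
--
--     def sandwich(ts):
--         if not ts:
--             return [f"ccx q[{controls[-1]}], q[{workspace[-1]}], q[{target}];"]
--         a, b, c = ts[0]
--         line = f"ccx q[{a}], q[{b}], q[{c}];"
--         return [line] + sandwich(ts[1:]) + [line]
--
--     return "\n".join(sandwich(triples))
-- ===== Notes on version B (the rewrite author's own statement) =====
-- stated objective: alternative
-- what changed: B replaces A's two explicit emit loops (forward ladder then countdown uncompute loop) by a recursive conjugation sandwich: the ladder's gate triples are built once and a recursion wraps the target line with each ladder gate on both sides, so the palindromic V-X-V† structure is produced directly with no second loop and no reversal.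
import Mathlib
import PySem

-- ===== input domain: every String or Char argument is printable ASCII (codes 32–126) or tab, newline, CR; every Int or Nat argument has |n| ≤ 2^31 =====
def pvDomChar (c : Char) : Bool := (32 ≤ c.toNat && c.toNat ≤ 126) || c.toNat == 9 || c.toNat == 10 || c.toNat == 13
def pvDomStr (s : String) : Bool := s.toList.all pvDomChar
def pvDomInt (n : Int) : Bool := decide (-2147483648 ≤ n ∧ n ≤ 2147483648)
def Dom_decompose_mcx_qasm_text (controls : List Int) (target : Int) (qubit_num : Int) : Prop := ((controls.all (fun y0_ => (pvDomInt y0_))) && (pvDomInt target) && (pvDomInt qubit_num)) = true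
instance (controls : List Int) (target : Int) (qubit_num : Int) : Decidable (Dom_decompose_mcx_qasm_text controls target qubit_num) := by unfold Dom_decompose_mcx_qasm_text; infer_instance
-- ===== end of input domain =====

-- B builds the ladder's gate triples once and emits the palindromic V·X·V† text by a
-- recursive conjugation sandwich instead of A's two explicit emit loops; same output.

-- ===== PORT A =====
-- the f-string f"ccx q[{a}], q[{b}], q[{c}];" (shared by both Pythons' formatting)
def ccxLine (a b c : Int) : String :=
  "ccx q[" ++ PySem.Int.toStr a ++ "], q[" ++ PySem.Int.toStr b ++ "], q[" ++ PySem.Int.toStr c ++ "];"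

def decompose_mcx_qasm_text (controls : List Int) (target : Int) (qubit_num : Int) : String :=
  let n : Int := controls.length
  let n_workspace : Int := n - 2
  -- used = set(controls) | {target}; workspace = [q for q in range(qubit_num) if q not in used][:n_workspace]
  let workspace : List Int :=
    PySem.List.slice ((PySem.List.pyRange 0 qubit_num 1).filter
      (fun q => !(controls.contains q || q == target))) none (some n_workspace)
  let lines1 : List String :=
    [ccxLine (PySem.List.pyGetD controls 0 0) (PySem.List.pyGetD controls 1 0) (PySem.List.pyGetD workspace 0 0)]
  let lines2 : List String :=
    (PySem.List.pyRange 1 n_workspace 1).foldl (fun acc i =>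
      acc ++ [ccxLine (PySem.List.pyGetD controls (i + 1) 0) (PySem.List.pyGetD workspace (i - 1) 0) (PySem.List.pyGetD workspace i 0)]) lines1
  let lines3 : List String :=
    lines2 ++ [ccxLine (PySem.List.pyGetD controls (-1) 0) (PySem.List.pyGetD workspace (-1) 0) target]
  let lines4 : List String :=
    (PySem.List.pyRange (n_workspace - 1) 0 (-1)).foldl (fun acc i =>
      acc ++ [ccxLine (PySem.List.pyGetD controls (i + 1) 0) (PySem.List.pyGetD workspace (i - 1) 0) (PySem.List.pyGetD workspace i 0)]) lines3
  PySem.Str.join "\n"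
    (lines4 ++ [ccxLine (PySem.List.pyGetD controls 0 0) (PySem.List.pyGetD controls 1 0) (PySem.List.pyGetD workspace 0 0)])

-- ===== PORT B =====
-- B's recursive conjugation sandwich: each ladder triple wraps the rest on both sides
def sandwich (mid : String) : List (Int × Int × Int) → List String
  | [] => [mid]
  | (a, b, c) :: ts => ccxLine a b c :: (sandwich mid ts ++ [ccxLine a b c])

def decompose_mcx_qasm_text_alt (controls : List Int) (target : Int) (qubit_num : Int) : String :=
  let n : Int := controls.length
  let n_workspace : Int := n - 2
  let workspace : List Int :=
    PySem.List.slice ((PySem.List.pyRange 0 qubit_num 1).filter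
      (fun q => !(controls.contains q || q == target))) none (some n_workspace)
  let triples : List (Int × Int × Int) :=
    (PySem.List.pyGetD controls 0 0, PySem.List.pyGetD controls 1 0, PySem.List.pyGetD workspace 0 0) ::
    (PySem.List.pyRange 1 n_workspace 1).map (fun i =>
      (PySem.List.pyGetD controls (i + 1) 0, PySem.List.pyGetD workspace (i - 1) 0, PySem.List.pyGetD workspace i 0))
  let mid : String := ccxLine (PySem.List.pyGetD controls (-1) 0) (PySem.List.pyGetD workspace (-1) 0) target
  PySem.Str.join "\n" (sandwich mid triples)

-- ===== PRECONDITION & SPEC =====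
-- Pre_ excludes exactly the inputs where A raises: the assert n >= 4 (AssertionError)
-- and the NotImplementedError when fewer than n-2 unused qubits exist in range(qubit_num).
-- closed form for "at least n-2 unused qubits exist in range(qubit_num)": the number of
-- free qubits is max(qubit_num,0) minus the number of DISTINCT used indices inside the range
def Pre_decompose_mcx_qasm_text (controls : List Int) (target : Int) (qubit_num : Int) : Prop :=
  4 ≤ controls.length ∧
  (controls.length : Int) - 2 ≤ max qubit_num 0 -
    (((target :: controls).dedup).filter (fun q => decide (0 ≤ q) && decide (q < qubit_num))).length

instance (controls : List Int) (target : Int) (qubit_num : Int) : Decidable (Pre_decompose_mcx_qasm_text controls target qubit_num) := by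
  unfold Pre_decompose_mcx_qasm_text; infer_instance

def pvWitness_decompose_mcx_qasm_text : List Int × Int × Int := ([0, 1, 2, 3], 4, 7)

def Spec_decompose_mcx_qasm_text (controls : List Int) (target : Int) (qubit_num : Int) (out : String) : Prop := out = decompose_mcx_qasm_text_alt controls target qubit_num
instance (controls : List Int) (target : Int) (qubit_num : Int) (out : String) : Decidable (Spec_decompose_mcx_qasm_text controls target qubit_num out) := by unfold Spec_decompose_mcx_qasm_text; infer_instance

-- ===== CLAIM =====
def Claim_equal_decompose_mcx_qasm_text : Prop := ∀ (controls : List Int) (target : Int) (qubit_num : Int), Dom_decompose_mcx_qasm_text controls target qubit_num → Pre_decompose_mcx_qasm_text controls target qubit_num → Spec_decompose_mcx_qasm_text controls target qubit_num (decompose_mcx_qasm_text controls target qubit_num)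

-- ===== LEMMAS AND PROOFS =====

-- the sandwich recursion produces exactly forward-lines ++ [mid] ++ reversed forward-lines
theorem sandwich_eq (mid : String) (ts : List (Int × Int × Int)) :
    sandwich mid ts
      = ts.map (fun t => ccxLine t.1 t.2.1 t.2.2) ++ [mid]
        ++ (ts.map (fun t => ccxLine t.1 t.2.1 t.2.2)).reverse := by
  induction ts with
  | nil => simp [sandwich]
  | cons t rest ih =>
    obtain ⟨a, b, c⟩ := t
    simp [sandwich, ih]

-- ===== VERDICT =====

theorem decompose_mcx_qasm_text_spec : Claim_equal_decompose_mcx_qasm_text := by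
  intro controls target qubit_num _hDom hPre
  obtain ⟨hn, _⟩ := hPre
  unfold Spec_decompose_mcx_qasm_text decompose_mcx_qasm_text decompose_mcx_qasm_text_alt
  set ws := PySem.List.slice ((PySem.List.pyRange 0 qubit_num 1).filter
      (fun q => !(controls.contains q || q == target))) none (some ((controls.length : Int) - 2)) with hws
  apply congrArg (PySem.Str.join "\n")
  rw [sandwich_eq,
      PySem.List.foldl_append_singleton_eq_map, PySem.List.foldl_append_singleton_eq_map]
  have hrev : PySem.List.pyRange ((controls.length : Int) - 2 - 1) 0 (-1)
      = (PySem.List.pyRange 1 ((controls.length : Int) - 2) 1).reverse := by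
    rw [PySem.List.pyRange_neg_one_eq_reverse]
    norm_num
  rw [hrev, List.map_reverse]
  simp [Function.comp_def]
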